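-- pv_equiv track=rewrite | github.com/soundarzozm/DSA-py | cp/div2/924/B.py | solve
-- ===== SOURCE A (Python) =====
-- def solve(n, arr):
--     x = 0
--
--     for i in range(n-1):
--         s = set()
--         for j in range(0, n):
--             if abs(arr[j] - arr[i]) < n and abs(arr[j] - arr[i]) > 0:
--                 s.add(abs(arr[j] - arr[i]))
--
--         x = max(x, len(s))
--
--     return x+1
-- ===== SOURCE B (Python) =====
-- def solve(n, arr):
--     # Instead of collecting pairwise absolute differences per anchor (A's nested
--     # index scan), iterate the candidate differences d = 1..n-1 directly and test
--     # hash membership of a-d / a+d in the value set; anchors are deduplicated.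
--     if n < 2:
--         return 1
--     vals = set(arr[:n])
--     anchors = set(arr[:n - 1])
--     best = 0
--     for a in anchors:
--         c = 0
--         for d in range(1, n):
--             if a - d in vals or a + d in vals:
--                 c += 1
--         best = max(best, c)
--     return best + 1
-- ===== Notes on version B (the rewrite author's own statement) =====
-- stated objective: alternative
-- what changed: B enumerates candidate differences d=1..n-1 per deduplicated anchor and tests set membership of a-d/a+d, instead of A's per-index inner scan collecting absolute differences into a fresh set; Pre_ excludes inputs where A raises IndexError (2 <= n > len(arr)).
import Mathlib
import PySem

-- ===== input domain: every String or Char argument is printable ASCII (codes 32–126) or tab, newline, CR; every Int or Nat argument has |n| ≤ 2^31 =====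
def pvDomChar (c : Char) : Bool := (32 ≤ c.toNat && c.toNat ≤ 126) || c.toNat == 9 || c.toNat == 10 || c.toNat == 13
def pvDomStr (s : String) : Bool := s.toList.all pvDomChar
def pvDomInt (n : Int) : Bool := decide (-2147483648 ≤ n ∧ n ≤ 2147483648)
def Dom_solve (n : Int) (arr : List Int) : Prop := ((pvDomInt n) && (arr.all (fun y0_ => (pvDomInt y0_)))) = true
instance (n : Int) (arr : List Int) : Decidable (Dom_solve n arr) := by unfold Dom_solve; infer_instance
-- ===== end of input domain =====

-- B enumerates candidate differences d = 1..n-1 per deduplicated anchor and tests set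
-- membership of a-d / a+d, instead of A's per-index inner scan collecting absolute
-- differences into a fresh set (objective: alternative algorithm, same worst-case cost).

-- ===== PORT A =====
def solve (n : Int) (arr : List Int) : Int :=
  let x : Int := (PySem.List.pyRange 0 (n - 1) 1).foldl (fun x i =>
    let s : PySem.Set Int := (PySem.List.pyRange 0 n 1).foldl (fun s j =>
      if |PySem.List.pyGetD arr j 0 - PySem.List.pyGetD arr i 0| < n ∧
         |PySem.List.pyGetD arr j 0 - PySem.List.pyGetD arr i 0| > 0 then
        PySem.Set.add s |PySem.List.pyGetD arr j 0 - PySem.List.pyGetD arr i 0|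
      else s) (PySem.Set.empty)
    max x (s.length : Int)) 0
  x + 1

-- ===== PORT B =====
def solve_alt (n : Int) (arr : List Int) : Int :=
  if n < 2 then 1
  else
    let vals : PySem.Set Int := PySem.Set.ofList (PySem.List.slice arr none (some n))
    let anchors : PySem.Set Int := PySem.Set.ofList (PySem.List.slice arr none (some (n - 1)))
    let best : Int := anchors.foldl (fun best a =>
      let c : Int := (PySem.List.pyRange 1 n 1).foldl (fun c d =>
        if PySem.Set.contains vals (a - d) || PySem.Set.contains vals (a + d) then c + 1 else c) 0
      max best c) 0
    best + 1

-- ===== PRECONDITION & SPEC =====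
-- A raises IndexError when 2 ≤ n and arr is shorter than n; Pre_ excludes exactly those.
def Pre_solve (n : Int) (arr : List Int) : Prop := 2 ≤ n → n ≤ (arr.length : Int)
instance (n : Int) (arr : List Int) : Decidable (Pre_solve n arr) := by unfold Pre_solve; infer_instance
def pvWitness_solve : Int × List Int := (3, [1, 2, 3])

def Spec_solve (n : Int) (arr : List Int) (out : Int) : Prop := out = solve_alt n arr
instance (n : Int) (arr : List Int) (out : Int) : Decidable (Spec_solve n arr out) := by unfold Spec_solve; infer_instance

-- ===== CLAIM (what is proved, stated in full; the proofs are below) =====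
def Claim_equal_solve : Prop := ∀ (n : Int) (arr : List Int), Dom_solve n arr → Pre_solve n arr → Spec_solve n arr (solve n arr)

-- ===== LEMMAS AND PROOFS =====

-- conditional-add loop = Set.update with the filtered, mapped list
theorem foldl_ite_add_eq_update {β : Type} (l : List β) (c : β → Prop) [DecidablePred c]
    (f : β → Int) (s : PySem.Set Int) :
    l.foldl (fun s j => if c j then PySem.Set.add s (f j) else s) s
      = PySem.Set.update s ((l.filter (fun j => decide (c j))).map f) := by
  induction l generalizing s with
  | nil => simp [PySem.Set.update]
  | cons hd tl ih =>
    by_cases h : c hd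
    · simp only [List.foldl_cons, List.filter_cons, h, decide_true, if_pos, List.map_cons,
        PySem.Set.update_cons]
      exact ih _
    · simp only [List.foldl_cons, List.filter_cons, h, decide_false, if_neg, not_false_iff]
      exact ih _

-- a 0/+1 counting loop is the filtered length
theorem foldl_ite_count {β : Type} (l : List β) (p : β → Bool) (init : Int) :
    l.foldl (fun c d => if p d then c + 1 else c) init
      = init + ((l.filter p).length : Int) := by
  induction l generalizing init with
  | nil => simp
  | cons hd tl ih =>
    by_cases h : p hd
    · simp only [List.foldl_cons, h, if_pos, List.filter_cons, List.length_cons, ih]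
      push_cast; ring
    · simp [List.foldl_cons, h, ih]

-- foldl max over two membership-equal Int lists agrees
theorem foldl_max_eq_of_mem_iff (l₁ l₂ : List Int) (a : Int)
    (h : ∀ x, x ∈ l₁ ↔ x ∈ l₂) : l₁.foldl max a = l₂.foldl max a := by
  apply le_antisymm
  · rcases PySem.List.foldl_max_mem l₁ a with hm | hm
    · rw [hm]; exact (PySem.List.le_foldl_max l₂ a).1
    · exact (PySem.List.le_foldl_max l₂ a).2 _ ((h _).1 hm)
  · rcases PySem.List.foldl_max_mem l₂ a with hm | hm
    · rw [hm]; exact (PySem.List.le_foldl_max l₁ a).1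
    · exact (PySem.List.le_foldl_max l₁ a).2 _ ((h _).2 hm)

-- B's inner counting loop, named for the proofs
def bCount (n : Int) (arr : List Int) (a : Int) : Int :=
  (PySem.List.pyRange 1 n 1).foldl (fun c d =>
    if PySem.Set.contains (PySem.Set.ofList (PySem.List.slice arr none (some n))) (a - d)
      || PySem.Set.contains (PySem.Set.ofList (PySem.List.slice arr none (some n))) (a + d)
    then c + 1 else c) 0

-- a difference d is realised by some in-range value iff a-d or a+d is such a value
theorem diff_mem_iff (W : List Int) (a d n : Int) :
    ((1 ≤ d ∧ d < n) ∧ ((a - d) ∈ W ∨ (a + d) ∈ W)) ↔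
    (∃ v ∈ W, (|v - a| < n ∧ |v - a| > 0) ∧ d = |v - a|) := by
  constructor
  · rintro ⟨⟨h1, h2⟩, hv | hv⟩
    · have habs : |a - d - a| = d := by
        rw [show a - d - a = -d by ring, abs_neg, abs_of_nonneg (by omega)]
      exact ⟨a - d, hv, ⟨by omega, by omega⟩, habs.symm⟩
    · have habs : |a + d - a| = d := by
        rw [show a + d - a = d by ring, abs_of_nonneg (by omega)]
      exact ⟨a + d, hv, ⟨by omega, by omega⟩, habs.symm⟩
  · rintro ⟨v, hv, ⟨hlt, hpos⟩, rfl⟩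
    refine ⟨⟨by omega, hlt⟩, ?_⟩
    rcases abs_cases (v - a) with ⟨he, _⟩ | ⟨he, _⟩
    · right; rw [show a + |v - a| = a + (v - a) from by rw [he], show a + (v - a) = v from by ring]
      exact hv
    · left; rw [show a - |v - a| = a + (v - a) from by rw [he]; ring, show a + (v - a) = v from by ring]
      exact hv

-- foldl of running max over two projections agrees when the projected images have equal membership
theorem foldl_max_proj_eq {β γ : Type} (l₁ : List β) (l₂ : List γ) (f : β → Int) (g : γ → Int)
    (a : Int) (h : ∀ x, (∃ b ∈ l₁, f b = x) ↔ (∃ c ∈ l₂, g c = x)) :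
    l₁.foldl (fun x b => max x (f b)) a = l₂.foldl (fun x c => max x (g c)) a := by
  rw [← List.foldl_map (f := f), ← List.foldl_map (f := g)]
  apply foldl_max_eq_of_mem_iff
  intro x
  simp only [List.mem_map]
  exact h x

-- A's inner set-building loop at anchor a has the length B counts
theorem inner_eq (n : Int) (arr : List Int) (a : Int) (h2 : 2 ≤ n)
    (hlen : n ≤ (arr.length : Int)) :
    (((PySem.List.pyRange 0 n 1).foldl (fun s j =>
        if |PySem.List.pyGetD arr j 0 - a| < n ∧ |PySem.List.pyGetD arr j 0 - a| > 0 then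
          PySem.Set.add s |PySem.List.pyGetD arr j 0 - a|
        else s) (PySem.Set.empty)).length : Int)
      = bCount n arr a := by
  rw [foldl_ite_add_eq_update, PySem.Set.update_empty]
  unfold bCount
  rw [foldl_ite_count, zero_add]
  have hW : PySem.List.slice arr none (some n) = List.take n.toNat arr :=
    PySem.List.slice_to arr (by omega)
  congr 1
  apply List.Perm.length_eq
  rw [List.perm_ext_iff_of_nodup (PySem.Set.nodup_ofList _)
    ((PySem.List.nodup_pyRange_one 1 n).filter _)]
  intro d
  rw [PySem.Set.mem_ofList, List.mem_filter, PySem.List.mem_pyRange_one]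
  constructor
  · rintro hd
    rw [List.mem_map] at hd
    obtain ⟨j, hj, rfl⟩ := hd
    rw [List.mem_filter, PySem.List.mem_pyRange_one, decide_eq_true_iff] at hj
    obtain ⟨⟨hj0, hjn⟩, hlt, hpos⟩ := hj
    have hjlt : j.toNat < arr.length := by omega
    have hget : PySem.List.pyGetD arr j 0 = arr[j.toNat] := by
      rw [PySem.List.pyGetD_of_nonneg arr 0 hj0, List.getD_eq_getElem arr 0 hjlt]
    have hmem : ((1 ≤ |PySem.List.pyGetD arr j 0 - a| ∧ |PySem.List.pyGetD arr j 0 - a| < n) ∧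
        ((a - |PySem.List.pyGetD arr j 0 - a|) ∈ List.take n.toNat arr ∨
         (a + |PySem.List.pyGetD arr j 0 - a|) ∈ List.take n.toNat arr)) := by
      rw [diff_mem_iff]
      refine ⟨PySem.List.pyGetD arr j 0, ?_, ⟨hlt, hpos⟩, rfl⟩
      rw [hget]
      have hjt : j.toNat < (List.take n.toNat arr).length := by
        rw [List.length_take]; omega
      have : (List.take n.toNat arr)[j.toNat] = arr[j.toNat] := List.getElem_take
      rw [← this]
      exact List.getElem_mem hjt
    obtain ⟨⟨hb1, hb2⟩, hor⟩ := hmem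
    refine ⟨⟨hb1, hb2⟩, ?_⟩
    rw [Bool.or_eq_true, PySem.Set.contains_iff, PySem.Set.contains_iff,
      PySem.Set.mem_ofList, PySem.Set.mem_ofList, hW]
    exact hor
  · rintro ⟨⟨hd1, hd2⟩, hc⟩
    rw [Bool.or_eq_true, PySem.Set.contains_iff, PySem.Set.contains_iff,
      PySem.Set.mem_ofList, PySem.Set.mem_ofList, hW] at hc
    have := (diff_mem_iff (List.take n.toNat arr) a d n).1 ⟨⟨hd1, hd2⟩, hc⟩
    obtain ⟨v, hvW, ⟨hlt, hpos⟩, rfl⟩ := this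
    rw [List.mem_iff_getElem] at hvW
    obtain ⟨m, hm, hv⟩ := hvW
    rw [List.length_take] at hm
    have hmn : m < n.toNat := by omega
    have hml : m < arr.length := by omega
    rw [List.mem_map]
    refine ⟨(m : Int), ?_, ?_⟩
    · rw [List.mem_filter, PySem.List.mem_pyRange_one, decide_eq_true_iff]
      have hget : PySem.List.pyGetD arr (m : Int) 0 = v := by
        rw [PySem.List.pyGetD_of_nonneg arr 0 (by positivity), Int.toNat_natCast,
          List.getD_eq_getElem arr 0 hml, ← List.getElem_take (j := n.toNat) (h := by
            rw [List.length_take]; omega), hv]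
      rw [hget]
      exact ⟨⟨by positivity, by omega⟩, hlt, hpos⟩
    · have hget : PySem.List.pyGetD arr (m : Int) 0 = v := by
        rw [PySem.List.pyGetD_of_nonneg arr 0 (by positivity), Int.toNat_natCast,
          List.getD_eq_getElem arr 0 hml, ← List.getElem_take (j := n.toNat) (h := by
            rw [List.length_take]; omega), hv]
      rw [hget]

-- ===== VERDICT (by name: the statement is the Claim_ definition above) =====
theorem solve_spec : Claim_equal_solve := by
  intro n arr _ hpre
  unfold Spec_solve solve solve_alt
  by_cases hn : n < 2
  · have hout : PySem.List.pyRange 0 (n - 1) 1 = [] :=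
      PySem.List.pyRange_one_eq_nil (by omega)
    rw [if_pos hn, hout]
    simp
  · have h2 : 2 ≤ n := by omega
    have hlen : n ≤ (arr.length : Int) := hpre h2
    rw [if_neg hn]
    simp only []
    congr 1
    apply foldl_max_proj_eq
    intro x
    constructor
    · rintro ⟨i, hi, rfl⟩
      rw [PySem.List.mem_pyRange_one] at hi
      obtain ⟨hi0, hin⟩ := hi
      have hilt : i.toNat < arr.length := by omega
      refine ⟨PySem.List.pyGetD arr i 0, ?_, (inner_eq n arr (PySem.List.pyGetD arr i 0) h2 hlen).symm⟩
      rw [PySem.Set.mem_ofList, PySem.List.slice_to arr (show (0 : Int) ≤ n - 1 by omega)]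
      have hit : i.toNat < (List.take (n - 1).toNat arr).length := by
        rw [List.length_take]; omega
      rw [PySem.List.pyGetD_of_nonneg arr 0 hi0, List.getD_eq_getElem arr 0 hilt,
        ← List.getElem_take (j := (n - 1).toNat) (h := hit)]
      exact List.getElem_mem hit
    · rintro ⟨a, ha, rfl⟩
      rw [PySem.Set.mem_ofList, PySem.List.slice_to arr (show (0 : Int) ≤ n - 1 by omega),
        List.mem_iff_getElem] at ha
      obtain ⟨m, hm, hv⟩ := ha
      rw [List.length_take] at hm
      have hml : m < arr.length := by omega
      refine ⟨(m : Int), ?_, ?_⟩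
      · rw [PySem.List.mem_pyRange_one]
        exact ⟨by positivity, by omega⟩
      · have hget : PySem.List.pyGetD arr (m : Int) 0 = a := by
          rw [PySem.List.pyGetD_of_nonneg arr 0 (by positivity), Int.toNat_natCast,
            List.getD_eq_getElem arr 0 hml,
            ← List.getElem_take (j := (n - 1).toNat) (h := by rw [List.length_take]; omega), hv]
        rw [hget]
        exact inner_eq n arr a h2 hlen
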